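-- pv_equiv track=rewrite | github.com/BrettRey/erdos-problem-993 | test_cb_pairwise.py | graph6_to_adj
-- ===== SOURCE A (Python) =====
-- def graph6_to_adj(s):
--     """Minimal graph6 decoder (ASCII, n < 63)."""
--     s = s.strip()
--     idx = 0
--     n = ord(s[idx]) - 63
--     idx += 1
--     bits = []
--     for ch in s[idx:]:
--         val = ord(ch) - 63
--         for b in range(5, -1, -1):
--             bits.append((val >> b) & 1)
--     adj = [[] for _ in range(n)]
--     k = 0
--     for j in range(1, n):
--         for i in range(j):
--             if k < len(bits) and bits[k]:
--                 adj[i].append(j)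
--                 adj[j].append(i)
--             k += 1
--     return adj
-- ===== SOURCE B (Python) =====
-- def graph6_to_adj(s):
--     """graph6 decoder (ASCII, n < 63): builds each adjacency row independently
--     by a per-vertex membership scan, instead of sweeping edge pairs with a counter."""
--     s = s.strip()
--     n = ord(s[0]) - 63
--     m = 6 * (len(s) - 1)
--
--     def bit(i, j):  # bit of the pair (i, j) with i < j
--         k = j * (j - 1) // 2 + i
--         return (ord(s[1 + k // 6]) - 63 >> (5 - k % 6)) & 1 if k < m else 0
--
--     return [[u for u in range(n) if u != v and bit(min(u, v), max(u, v))]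
--             for v in range(n)]
-- ===== Notes on version B (the rewrite author's own statement) =====
-- stated objective: faster
-- what changed: B abandons A's two-phase decode (flat bits list + stateful pair sweep mutating adj through a shared edge counter): it builds each adjacency row independently as a per-vertex filter of range(n), computing the bit of a pair (i,j) on demand at index j*(j-1)//2+i straight from the string, so it never decodes bits the n(n-1)/2 pairs never consume.
import Mathlib
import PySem

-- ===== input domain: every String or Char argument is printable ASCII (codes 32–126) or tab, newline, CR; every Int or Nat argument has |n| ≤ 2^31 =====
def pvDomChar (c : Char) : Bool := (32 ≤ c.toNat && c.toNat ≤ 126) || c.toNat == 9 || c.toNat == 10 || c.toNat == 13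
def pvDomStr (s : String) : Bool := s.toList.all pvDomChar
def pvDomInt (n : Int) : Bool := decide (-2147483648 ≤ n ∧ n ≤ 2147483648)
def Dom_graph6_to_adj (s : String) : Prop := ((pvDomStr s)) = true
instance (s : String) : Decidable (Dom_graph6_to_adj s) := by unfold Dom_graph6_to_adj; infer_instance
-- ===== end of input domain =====

-- B replaces A's two-phase decode (flat bits list + stateful pair sweep mutating adj
-- through a shared edge counter) by an independent per-vertex construction: each row v
-- is a filter of range(n), reading the bit of pair (i,j) on demand at index
-- j*(j-1)//2 + i straight from the string; no bits array, no counter, no mutation.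

-- ===== PORT A =====
-- literal transliteration of A: decode ALL bits into a list, then fill adj with a counter k
def graph6_to_adj (s : String) : List (List Int) :=
  -- s = s.strip(): the stripped string is used throughout below
  match PySem.Str.pyGet? (PySem.Str.strip s) 0 with
  | none => []   -- Python raises IndexError here (string empty after strip); excluded by Pre_
  | some c =>
    let n : Int := (c.toNat : Int) - 63
    let bits : List Int :=
      (PySem.Str.slice (PySem.Str.strip s) (some 1) none).toList.foldl
        (fun bits ch =>
          let val : Int := (ch.toNat : Int) - 63
          (PySem.List.pyRange 5 (-1) (-1)).foldl
            (fun bits b => bits ++ [PySem.Int.band (val >>> b.toNat) 1]) bits)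
        []
    let adj : List (List Int) := (PySem.List.pyRange 0 n 1).map (fun _ => [])
    let st := (PySem.List.pyRange 1 n 1).foldl
      (fun (st : List (List Int) × Int) j =>
        (PySem.List.pyRange 0 j 1).foldl
          (fun st i =>
            -- i, j are nonnegative and < n = adj.length here, so List.modify is exact for append
            let st' := if st.2 < PySem.List.len bits ∧ PySem.List.pyGetD bits st.2 0 ≠ 0 then
                (st.1.modify i.toNat (· ++ [j])).modify j.toNat (· ++ [i])
              else st.1
            (st', st.2 + 1)) st)
      (adj, 0)
    st.1

-- ===== PORT B =====
-- literal transliteration of Source B: each row built independently as a filter of range(n),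
-- the bit of a pair read on demand from the string at index j*(j-1)//2 + i
def graph6_to_adj_alt (s : String) : List (List Int) :=
  -- s = s.strip(): the stripped string is used throughout below
  match PySem.Str.pyGet? (PySem.Str.strip s) 0 with
  | none => []   -- Python raises IndexError here (string empty after strip); excluded by Pre_
  | some c =>
    let t := PySem.Str.strip s
    let n : Int := (c.toNat : Int) - 63
    let m : Int := 6 * (PySem.Str.len t - 1)
    -- def bit(i, j): bit of the pair (i, j) with i < j
    let bit : Int → Int → Int := fun i j =>
      let k : Int := PySem.Int.floordiv (j * (j - 1)) 2 + i
      if k < m then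
        PySem.Int.band
          (((((PySem.Str.pyGet? t (1 + PySem.Int.floordiv k 6)).getD 'A').toNat : Int) - 63)
            >>> (5 - PySem.Int.mod k 6).toNat) 1
      else 0
    (PySem.List.pyRange 0 n 1).map (fun v =>
      (PySem.List.pyRange 0 n 1).filter (fun u =>
        decide (u ≠ v) && decide (bit (min u v) (max u v) ≠ 0)))

-- ===== PRECONDITION & SPEC =====
-- Pre_ excludes exactly the inputs that are empty after stripping whitespace, on which
-- both Pythons raise IndexError at s[0].
def Pre_graph6_to_adj (s : String) : Prop := PySem.Str.strip s ≠ ""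
instance (s : String) : Decidable (Pre_graph6_to_adj s) := by unfold Pre_graph6_to_adj; infer_instance
def pvWitness_graph6_to_adj : String := "B_"
def Spec_graph6_to_adj (s : String) (out : List (List Int)) : Prop := out = graph6_to_adj_alt s
instance (s : String) (out : List (List Int)) : Decidable (Spec_graph6_to_adj s out) := by unfold Spec_graph6_to_adj; infer_instance

-- ===== CLAIM (what is proved, stated in full; the proofs are below) =====
def Claim_equal_graph6_to_adj : Prop := ∀ (s : String), Dom_graph6_to_adj s → Pre_graph6_to_adj s → Spec_graph6_to_adj s (graph6_to_adj s)

-- ===== LEMMAS AND PROOFS =====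

-- proof-side names for subterms of the two ports (definitionally equal to them)
abbrev pvF (ch : Char) (b : Int) : Int := PySem.Int.band (((ch.toNat : Int) - 63) >>> ((b.toNat : Nat) : Int)) 1

abbrev pvBits (t : String) : List Int :=
  (PySem.Str.slice t (some 1) none).toList.foldl
    (fun bits ch =>
      let val : Int := (ch.toNat : Int) - 63
      (PySem.List.pyRange 5 (-1) (-1)).foldl
        (fun bits b => bits ++ [PySem.Int.band (val >>> b.toNat) 1]) bits) []

def pvBitB (t : String) (k : Int) : Int :=
  if k < 6 * (PySem.Str.len t - 1) then
    PySem.Int.band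
      (((((PySem.Str.pyGet? t (1 + PySem.Int.floordiv k 6)).getD 'A').toNat : Int) - 63)
        >>> (5 - PySem.Int.mod k 6).toNat) 1
  else 0

-- k-index of the pair (i, j), i < j: j*(j-1)//2 + i; pvT j is its row offset
def pvT (j : Int) : Int := PySem.Int.floordiv (j * (j - 1)) 2

-- B's row-v membership test, written over pvBitB (definitionally B's filter predicate)
def pvPred (t : String) (v u : Int) : Bool :=
  decide (u ≠ v) && decide (pvBitB t (pvT (max u v) + min u v) ≠ 0)

-- B's row v truncated to candidates below J
def pvRowAt (t : String) (J v : Int) : List Int :=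
  if v < J then (PySem.List.pyRange 0 J 1).filter (pvPred t v) else []

-- A's inner-loop step at column j, with the bit condition in pvBitB form
def pvStep (t : String) (j : Int) (st : List (List Int) × Int) (i : Int) :
    List (List Int) × Int :=
  (if pvBitB t st.2 ≠ 0 then (st.1.modify i.toNat (· ++ [j])).modify j.toNat (· ++ [i])
   else st.1, st.2 + 1)

-- the rows of A's state in the middle of the inner loop at column j, after I steps
def pvProw (t : String) (j : Int) (I : Nat) (v : Int) : List Int :=
  if v < (I : Int) then pvRowAt t (j + 1) v
  else if v < j then pvRowAt t j v
  else if v = j then (PySem.List.pyRange 0 (I : Int) 1).filter (pvPred t j)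
  else []

theorem pv_foldl_inv {α σ : Type} (P : σ → Prop) {f g : σ → α → σ}
    (l : List α) (st : σ) (hst : P st)
    (hfg : ∀ st a, P st → f st a = g st a) (hP : ∀ st a, P st → P (f st a)) :
    l.foldl f st = l.foldl g st := by
  induction l generalizing st with
  | nil => rfl
  | cons x xs ih =>
    simp only [List.foldl_cons]
    rw [← hfg st x hst]
    exact ih _ (hP st x hst)

theorem pv_foldl_pres {α σ : Type} (P : σ → Prop) {f : σ → α → σ}
    (l : List α) (st : σ) (hst : P st)
    (hP : ∀ st a, P st → P (f st a)) : P (l.foldl f st) := by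
  induction l generalizing st with
  | nil => exact hst
  | cons x xs ih => exact ih _ (hP st x hst)

theorem pv_sum_const (l : List Char) : (l.map (fun _ => (6 : Nat))).sum = 6 * l.length := by
  induction l with
  | nil => rfl
  | cons c cs ih => simp only [List.map_cons, List.sum_cons, List.length_cons, ih]; ring

theorem pv_shift_cast (a : Int) (n : Nat) : a >>> ((n : Nat) : Int) = a >>> n := Int.shiftRight_natCast_right a n

theorem pv_range6 : PySem.List.pyRange 5 (-1) (-1) = [5, 4, 3, 2, 1, 0] := by decide

theorem pv_glen (ch : Char) : ((PySem.List.pyRange 5 (-1) (-1)).map (pvF ch)).length = 6 := by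
  rw [pv_range6]
  rfl

theorem pv_bits_flat (t : String) :
    pvBits t = (t.toList.drop 1).flatMap
      (fun ch => (PySem.List.pyRange 5 (-1) (-1)).map (pvF ch)) := by
  unfold pvBits
  have h1 : (PySem.Str.slice t (some 1) none).toList = t.toList.drop 1 := by
    rw [PySem.Str.toList_slice]
    show PySem.List.slice t.toList (some 1) none = List.drop 1 t.toList
    rw [PySem.List.slice_from_one, List.drop_one]
  rw [h1]
  simp only [PySem.List.foldl_append_singleton_eq_map, PySem.List.foldl_append_eq_flatMap]
  rfl

theorem pv_bits_len (t : String) : (pvBits t).length = 6 * (t.toList.drop 1).length := by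
  rw [pv_bits_flat, List.length_flatMap]
  have h : (fun ch : Char => ((PySem.List.pyRange 5 (-1) (-1)).map (pvF ch)).length)
      = fun _ : Char => 6 := by
    funext ch
    exact pv_glen ch
  rw [h, pv_sum_const]

theorem pv_chunk_get (gl : Char → List Int) (hg : ∀ ch, (gl ch).length = 6) :
    ∀ (chars : List Char) (u : Nat), u < 6 * chars.length →
      (chars.flatMap gl).getD u 0 = (gl (chars.getD (u / 6) 'A')).getD (u % 6) 0 := by
  intro chars
  induction chars with
  | nil => intro u hu; simp at hu
  | cons c cs ih =>
    intro u hu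
    simp only [List.flatMap_cons]
    by_cases h6 : u < 6
    · have hq : u / 6 = 0 := by omega
      have hr : u % 6 = u := by omega
      rw [hq, hr]
      simp only [List.getD, List.getElem?_append_left (by rw [hg c]; omega : u < (gl c).length)]
      rfl
    · have hlen : (gl c).length ≤ u := by rw [hg c]; omega
      simp only [List.getD, List.getElem?_append_right hlen, hg c]
      have h1 : u - 6 < 6 * cs.length := by simp at hu; omega
      have := ih (u - 6) h1
      simp only [List.getD] at this
      rw [this]
      have e1 : (u - 6) / 6 = u / 6 - 1 := by omega
      have e2 : (u - 6) % 6 = u % 6 := by omega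
      have e3 : u / 6 ≠ 0 := by omega
      rw [e1, e2]
      congr 2
      cases h : u / 6 with
      | zero => exact absurd h e3
      | succ v => simp

theorem pv_chunk_eq (ch : Char) (p : Nat) (hp : p < 6) :
    (((PySem.List.pyRange 5 (-1) (-1)).map (pvF ch)).getD p 0)
      = pvF ch ((5 : Int) - (p : Int)) := by
  rw [pv_range6]
  interval_cases p <;> norm_num [List.getD]

-- A's indexed bit equals B's directly computed bit, for every nonnegative in-range counter
theorem pv_elem (t : String) (c : Char) (cs : List Char) (hct : t.toList = c :: cs)
    (k : Int) (hk : 0 ≤ k) (hklt : k.toNat < 6 * cs.length) :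
    PySem.List.pyGetD (pvBits t) k 0
      = PySem.Int.band
          (((((PySem.Str.pyGet? t (1 + PySem.Int.floordiv k 6)).getD 'A').toNat : Int) - 63)
            >>> (5 - PySem.Int.mod k 6).toNat) 1 := by
  have hku : ((k.toNat : Nat) : Int) = k := Int.toNat_of_nonneg hk
  have hdrop : t.toList.drop 1 = cs := by rw [hct]; rfl
  rw [PySem.List.pyGetD_of_nonneg _ _ hk, pv_bits_flat, hdrop,
      pv_chunk_get _ pv_glen cs k.toNat hklt,
      pv_chunk_eq _ _ (by omega)]
  have hfd : PySem.Int.floordiv k 6 = ((k.toNat / 6 : Nat) : Int) := by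
    rw [← hku]; exact_mod_cast PySem.Int.floordiv_natCast k.toNat 6
  have hmd : PySem.Int.mod k 6 = ((k.toNat % 6 : Nat) : Int) := by
    rw [← hku]; exact_mod_cast PySem.Int.mod_natCast k.toNat 6
  have hidx : (1 : Int) + ((k.toNat / 6 : Nat) : Int) = (((1 + k.toNat / 6 : Nat) : Nat) : Int) := by
    push_cast; ring
  have hq : k.toNat / 6 < cs.length := by omega
  have hgets : PySem.Str.pyGet? t (1 + PySem.Int.floordiv k 6) = some cs[k.toNat / 6] := by
    rw [hfd, hidx, PySem.Str.pyGet?_natCast, hct, Nat.add_comm,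
        List.getElem?_cons_succ, List.getElem?_eq_getElem hq]
  rw [hgets, hmd, Option.getD_some, List.getD_eq_getElem cs 'A' hq]
  simp only [pvF, pv_shift_cast]

-- the two loop conditions agree for every nonnegative counter value
theorem pv_cond (t : String) (c : Char) (cs : List Char) (hct : t.toList = c :: cs)
    (k : Int) (hk : 0 ≤ k) :
    (k < PySem.List.len (pvBits t) ∧ PySem.List.pyGetD (pvBits t) k 0 ≠ 0)
      ↔ pvBitB t k ≠ 0 := by
  have hL : t.toList.length = cs.length + 1 := by rw [hct]; rfl
  have hlenb : (pvBits t).length = 6 * cs.length := by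
    rw [pv_bits_len, hct]; rfl
  have hm : 6 * (PySem.Str.len t - 1) = ((6 * cs.length : Nat) : Int) := by
    rw [PySem.Str.len_eq, hL]; push_cast; ring
  unfold pvBitB
  by_cases hkm : k < 6 * (PySem.Str.len t - 1)
  · have hklt : k.toNat < 6 * cs.length := by rw [hm] at hkm; omega
    have h1 : k < PySem.List.len (pvBits t) := by
      rw [PySem.List.len_eq, hlenb]; rw [hm] at hkm; exact_mod_cast hkm
    rw [if_pos hkm, pv_elem t c cs hct k hk hklt]
    exact ⟨fun h => h.2, fun h => ⟨h1, h⟩⟩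
  · have h0 : ¬ k < PySem.List.len (pvBits t) := by
      rw [PySem.List.len_eq, hlenb]; rw [hm] at hkm
      intro h; apply hkm; exact_mod_cast h
    rw [if_neg hkm]
    exact ⟨fun h => absurd h.1 h0, fun h => absurd rfl h⟩

-- A's loop, with its bit-list condition rewritten to pvBitB form (pvStep)
theorem pv_loopsA (t : String) (c : Char) (cs : List Char) (hct : t.toList = c :: cs) (n : Int) :
    (PySem.List.pyRange 1 n 1).foldl
        (fun (st : List (List Int) × Int) j =>
          (PySem.List.pyRange 0 j 1).foldl
            (fun st i =>
              let st' := if st.2 < PySem.List.len (pvBits t) ∧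
                  PySem.List.pyGetD (pvBits t) st.2 0 ≠ 0 then
                  (st.1.modify i.toNat (· ++ [j])).modify j.toNat (· ++ [i])
                else st.1
              (st', st.2 + 1)) st)
        ((PySem.List.pyRange 0 n 1).map (fun _ => []), 0)
      = (PySem.List.pyRange 1 n 1).foldl
        (fun (st : List (List Int) × Int) j =>
          (PySem.List.pyRange 0 j 1).foldl (pvStep t j) st)
        ((PySem.List.pyRange 0 n 1).map (fun _ => []), 0) := by
  refine pv_foldl_inv (fun st : List (List Int) × Int => 0 ≤ st.2) _ _ (by norm_num) ?_ ?_
  · intro st j hst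
    refine pv_foldl_inv (fun st : List (List Int) × Int => 0 ≤ st.2) _ _ hst ?_ ?_
    · intro st i hst
      show ((if st.2 < PySem.List.len (pvBits t) ∧ PySem.List.pyGetD (pvBits t) st.2 0 ≠ 0 then
            (st.1.modify i.toNat (· ++ [j])).modify j.toNat (· ++ [i]) else st.1), st.2 + 1)
        = ((if pvBitB t st.2 ≠ 0 then
            (st.1.modify i.toNat (· ++ [j])).modify j.toNat (· ++ [i]) else st.1), st.2 + 1)
      rw [if_congr (pv_cond t c cs hct st.2 hst) rfl rfl]
    · intro st i hst
      show (0 : Int) ≤ st.2 + 1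
      omega
  · intro st j hst
    refine pv_foldl_pres (fun st : List (List Int) × Int => 0 ≤ st.2) _ _ hst ?_
    intro st i hst
    show (0 : Int) ≤ st.2 + 1
    omega

-- row offsets: pvT (j+1) = pvT j + j
theorem pv_T_succ (j : Int) : pvT (j + 1) = pvT j + j := by
  unfold pvT
  rw [PySem.Int.floordiv_eq_ediv_of_pos (by norm_num), PySem.Int.floordiv_eq_ediv_of_pos (by norm_num)]
  obtain ⟨m, hm⟩ := Int.even_mul_succ_self (j - 1)
  have h1 : j * (j - 1) = 2 * m := by linear_combination hm
  have h2 : (j + 1) * (j + 1 - 1) = 2 * m + 2 * j := by linear_combination hm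
  rw [h1, h2]
  omega

-- modify on a map over range 0..n-1 is a pointwise functional update
theorem pv_modify_map (n : Int) (f : Int → List Int) (k : Nat) (g : List Int → List Int)
    (_hk : (k : Int) < n) :
    ((PySem.List.pyRange 0 n 1).map f).modify k g
      = (PySem.List.pyRange 0 n 1).map (fun v => if v = (k : Int) then g (f v) else f v) := by
  apply List.ext_getElem
  · simp
  · intro p h1 h2
    have hlen : p < (n - 0).toNat := by
      simpa [PySem.List.length_pyRange_one] using h2
    simp only [List.getElem_modify, List.getElem_map, PySem.List.getElem_pyRange_one]
    have : ((0 : Int) + (p : Int) = (k : Int)) ↔ (k = p) := by omega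
    split_ifs with ha hb hb
    · rfl
    · exact absurd (this.mpr ha) hb
    · exact absurd (this.mp hb) ha
    · rfl

theorem pv_pred_self (t : String) (v : Int) : pvPred t v v = false := by
  simp [pvPred]

theorem pv_pred_lo (t : String) (v j : Int) (h : v < j) :
    pvPred t v j = decide (pvBitB t (pvT j + v) ≠ 0) := by
  unfold pvPred
  rw [max_eq_left h.le, min_eq_right h.le]
  simp [h.ne']

theorem pv_pred_hi (t : String) (j i : Int) (h : i < j) :
    pvPred t j i = decide (pvBitB t (pvT j + i) ≠ 0) := by
  unfold pvPred
  rw [max_eq_right h.le, min_eq_left h.le]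
  simp [h.ne]

theorem pv_rowAt_succ (t : String) (j v : Int) (h0 : 0 ≤ j) (hv : v < j) :
    pvRowAt t (j + 1) v = pvRowAt t j v ++ (if pvPred t v j then [j] else []) := by
  unfold pvRowAt
  rw [if_pos (by omega : v < j + 1), if_pos hv, PySem.List.pyRange_one_succ_right h0,
    List.filter_append]
  congr 1
  cases h : pvPred t v j <;> simp [h]

-- modify at a nonnegative Int index, .toNat form as it appears in the port
theorem pv_modify_map' (n : Int) (f : Int → List Int) (k : Int) (g : List Int → List Int)
    (h0 : 0 ≤ k) (hk : k < n) :
    ((PySem.List.pyRange 0 n 1).map f).modify k.toNat g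
      = (PySem.List.pyRange 0 n 1).map (fun v => if v = k then g (f v) else f v) := by
  have h := pv_modify_map n f k.toNat g (by rw [Int.toNat_of_nonneg h0]; exact hk)
  rw [Int.toNat_of_nonneg h0] at h
  exact h

-- one inner step, in functional-update form
theorem pv_inner_step (t : String) (n j : Int) (h1 : 1 ≤ j) (hjn : j < n)
    (I : Nat) (hIj : (I : Int) < j) :
    pvStep t j ((PySem.List.pyRange 0 n 1).map (pvProw t j I), pvT j + I) (I : Int)
      = ((PySem.List.pyRange 0 n 1).map (pvProw t j (I + 1)), pvT j + (I + 1 : Nat)) := by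
  have hIn : (I : Int) < n := lt_trans hIj hjn
  have hcast : ((I + 1 : Nat) : Int) = (I : Int) + 1 := by push_cast; ring
  have hfilt : (PySem.List.pyRange 0 ((I : Int) + 1) 1).filter (pvPred t j)
      = (PySem.List.pyRange 0 (I : Int) 1).filter (pvPred t j)
        ++ (if pvPred t j I then [(I : Int)] else []) := by
    rw [PySem.List.pyRange_one_succ_right (by omega : (0:Int) ≤ I), List.filter_append]
    congr 1
    cases h : pvPred t j (I : Int) <;> simp [h]
  unfold pvStep
  by_cases hc : pvBitB t (pvT j + I) ≠ 0
  · rw [if_pos hc,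
        pv_modify_map' n _ (I : Int) _ (by omega) hIn,
        pv_modify_map' n _ j _ (by omega) hjn]
    refine Prod.ext ?_ (by simp only []; push_cast; ring)
    simp only []
    apply List.map_congr_left
    intro v hv
    have hv0 : 0 ≤ v ∧ v < n := by
      have := (PySem.List.mem_pyRange_one).mp hv
      omega
    by_cases hvI : v = (I : Int)
    · have hvlt : v < j := by omega
      rw [if_neg (show ¬ v = j by omega), if_pos hvI]
      unfold pvProw
      rw [if_neg (show ¬ v < (I : Int) by omega), if_pos hvlt,
          if_pos (show v < ((I + 1 : Nat) : Int) by rw [hcast]; omega)]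
      rw [pv_rowAt_succ t j v (by omega) hvlt, pv_pred_lo t v j hvlt, hvI]
      simp [hc]
    · by_cases hvj : v = j
      · rw [if_pos hvj, if_neg hvI]
        unfold pvProw
        rw [if_neg (show ¬ v < (I : Int) by omega), if_neg (show ¬ v < j by omega), if_pos hvj,
            if_neg (show ¬ v < ((I + 1 : Nat) : Int) by rw [hcast]; omega),
            if_neg (show ¬ v < j by omega), if_pos hvj, hcast, hfilt,
            pv_pred_hi t j (I : Int) hIj]
        simp [hc]
      · rw [if_neg hvj, if_neg hvI]
        unfold pvProw
        by_cases hlt : v < (I : Int)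
        · rw [if_pos hlt, if_pos (show v < ((I + 1 : Nat) : Int) by rw [hcast]; omega)]
        · rw [if_neg hlt, if_neg (show ¬ v < ((I + 1 : Nat) : Int) by rw [hcast]; omega),
              if_neg hvj, if_neg hvj]
  · rw [if_neg hc]
    refine Prod.ext ?_ (by simp only []; push_cast; ring)
    simp only []
    apply List.map_congr_left
    intro v hv
    have hv0 : 0 ≤ v ∧ v < n := by
      have := (PySem.List.mem_pyRange_one).mp hv
      omega
    by_cases hvI : v = (I : Int)
    · have hvlt : v < j := by omega
      unfold pvProw
      rw [if_neg (show ¬ v < (I : Int) by omega), if_pos hvlt,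
          if_pos (show v < ((I + 1 : Nat) : Int) by rw [hcast]; omega)]
      rw [pv_rowAt_succ t j v (by omega) hvlt, pv_pred_lo t v j hvlt, hvI]
      simp [hc]
    · by_cases hvj : v = j
      · unfold pvProw
        rw [if_neg (show ¬ v < (I : Int) by omega), if_neg (show ¬ v < j by omega), if_pos hvj,
            if_neg (show ¬ v < ((I + 1 : Nat) : Int) by rw [hcast]; omega),
            if_neg (show ¬ v < j by omega), if_pos hvj, hcast, hfilt,
            pv_pred_hi t j (I : Int) hIj]
        simp [hc]
      · unfold pvProw
        by_cases hlt : v < (I : Int)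
        · rw [if_pos hlt, if_pos (show v < ((I + 1 : Nat) : Int) by rw [hcast]; omega)]
        · rw [if_neg hlt, if_neg (show ¬ v < ((I + 1 : Nat) : Int) by rw [hcast]; omega),
              if_neg hvj, if_neg hvj]

-- the inner loop up to step I, as a map of pvProw
theorem pv_inner (t : String) (n j : Int) (h1 : 1 ≤ j) (hjn : j < n) :
    ∀ I : Nat, (I : Int) ≤ j →
      (PySem.List.pyRange 0 (I : Int) 1).foldl (pvStep t j)
          ((PySem.List.pyRange 0 n 1).map (pvProw t j 0), pvT j)
        = ((PySem.List.pyRange 0 n 1).map (pvProw t j I), pvT j + I) := by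
  intro I
  induction I with
  | zero =>
    intro _
    rw [show PySem.List.pyRange 0 (((0:Nat) : Int)) 1 = [] from
      PySem.List.pyRange_one_eq_nil (by norm_num)]
    simp
  | succ I ih =>
    intro hIj
    have hI : (I : Int) ≤ j := by push_cast at hIj ⊢; omega
    have hIlt : (I : Int) < j := by push_cast at hIj; omega
    have : ((I + 1 : Nat) : Int) = (I : Int) + 1 := by push_cast; ring
    rw [this, PySem.List.pyRange_one_succ_right (by omega : (0:Int) ≤ I), List.foldl_append,
        ih hI]
    simpa using pv_inner_step t n j h1 hjn I hIlt

-- start and end of the inner loop, rephrased through pvRowAt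
theorem pv_prow_zero (t : String) (n j : Int) :
    (PySem.List.pyRange 0 n 1).map (pvRowAt t j) = (PySem.List.pyRange 0 n 1).map (pvProw t j 0) := by
  apply List.map_congr_left
  intro v hv
  have hv0 : 0 ≤ v := by
    have := (PySem.List.mem_pyRange_one).mp hv
    omega
  unfold pvProw
  rw [if_neg (show ¬ v < ((0 : Nat) : Int) by omega)]
  by_cases hvj : v < j
  · rw [if_pos hvj]
  · rw [if_neg hvj]
    unfold pvRowAt
    rw [if_neg hvj]
    by_cases hej : v = j
    · rw [if_pos hej, show PySem.List.pyRange 0 (((0:Nat) : Int)) 1 = [] from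
        PySem.List.pyRange_one_eq_nil (by norm_num)]
      rfl
    · rw [if_neg hej]

theorem pv_prow_full (t : String) (n j : Int) (h1 : 1 ≤ j) :
    (PySem.List.pyRange 0 n 1).map (pvProw t j j.toNat)
      = (PySem.List.pyRange 0 n 1).map (pvRowAt t (j + 1)) := by
  have hjt : ((j.toNat : Nat) : Int) = j := Int.toNat_of_nonneg (by omega)
  apply List.map_congr_left
  intro v hv
  have hv0 : 0 ≤ v := by
    have := (PySem.List.mem_pyRange_one).mp hv
    omega
  unfold pvProw
  rw [hjt]
  by_cases hvj : v < j
  · rw [if_pos hvj]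
  · rw [if_neg hvj, if_neg hvj]
    by_cases hej : v = j
    · rw [if_pos hej]
      unfold pvRowAt
      rw [if_pos (by omega), PySem.List.pyRange_one_succ_right (by omega : (0:Int) ≤ j),
          List.filter_append, hej]
      have h2 : List.filter (pvPred t j) [j] = [] := by
        simp [List.filter, pv_pred_self]
      rw [h2, List.append_nil]
    · rw [if_neg hej]
      unfold pvRowAt
      rw [if_neg (by omega)]

-- the outer loop: after columns 1 .. J-1, A's rows are B's rows truncated at J
theorem pv_outer (t : String) (n : Int) :
    ∀ b : Nat, 1 + (b : Int) ≤ n →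
      (PySem.List.pyRange 1 (1 + (b : Int)) 1).foldl
          (fun (st : List (List Int) × Int) j =>
            (PySem.List.pyRange 0 j 1).foldl (pvStep t j) st)
          ((PySem.List.pyRange 0 n 1).map (fun _ => []), 0)
        = ((PySem.List.pyRange 0 n 1).map (pvRowAt t (1 + (b : Int))), pvT (1 + (b : Int))) := by
  intro b
  induction b with
  | zero =>
    intro _
    rw [show PySem.List.pyRange 1 (1 + ((0:Nat) : Int)) 1 = [] from
      PySem.List.pyRange_one_eq_nil (by norm_num)]
    simp only [List.foldl_nil]
    refine Prod.ext ?_ (by norm_num; decide)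
    simp only []
    apply List.map_congr_left
    intro v hv
    have hv0 : 0 ≤ v := by
      have := (PySem.List.mem_pyRange_one).mp hv
      omega
    unfold pvRowAt
    norm_num
    intro h a ha0 ha1
    have hav : a = v := by omega
    rw [hav]
    exact pv_pred_self t v
  | succ b ih =>
    intro hbn
    have hb : 1 + (b : Int) ≤ n := by push_cast at hbn ⊢; omega
    set j : Int := 1 + (b : Int) with hj
    have hjn : j < n := by push_cast at hbn; omega
    have h1j : 1 ≤ j := by omega
    have hcast : 1 + ((b + 1 : Nat) : Int) = j + 1 := by push_cast; ring
    rw [hcast, PySem.List.pyRange_one_succ_right (by omega : (1:Int) ≤ j), List.foldl_append,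
        ih hb]
    simp only [List.foldl_cons, List.foldl_nil]
    have hjt : ((j.toNat : Nat) : Int) = j := Int.toNat_of_nonneg (by omega)
    have := pv_inner t n j h1j hjn j.toNat (by omega)
    rw [← pv_prow_zero t n j] at this
    rw [hjt] at this
    rw [this, pv_prow_full t n j h1j, pv_T_succ]

-- ===== VERDICT (by name: the statement is the Claim_ definition above) =====
set_option maxHeartbeats 1600000 in
theorem graph6_to_adj_spec : Claim_equal_graph6_to_adj := by
  intro s _ hpre
  unfold Spec_graph6_to_adj graph6_to_adj graph6_to_adj_alt
  obtain ⟨c, cs, hct⟩ : ∃ c cs, (PySem.Str.strip s).toList = c :: cs := by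
    cases h : (PySem.Str.strip s).toList with
    | nil =>
      exfalso
      apply hpre
      cases hs : PySem.Str.strip s
      simp_all
    | cons a l => exact ⟨a, l, rfl⟩
  have hget0 : PySem.Str.pyGet? (PySem.Str.strip s) 0 = some c := by
    have h0 : ((0 : Nat) : Int) = (0 : Int) := rfl
    rw [← h0, PySem.Str.pyGet?_natCast, hct]
    rfl
  rw [hget0]
  set t : String := PySem.Str.strip s with ht
  set n : Int := (c.toNat : Int) - 63 with hn
  show ((PySem.List.pyRange 1 n 1).foldl
      (fun (st : List (List Int) × Int) j =>
        (PySem.List.pyRange 0 j 1).foldl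
          (fun st i =>
            let st' := if st.2 < PySem.List.len (pvBits t) ∧
                PySem.List.pyGetD (pvBits t) st.2 0 ≠ 0 then
                (st.1.modify i.toNat (· ++ [j])).modify j.toNat (· ++ [i])
              else st.1
            (st', st.2 + 1)) st)
      ((PySem.List.pyRange 0 n 1).map (fun _ => []), 0)).1
    = (PySem.List.pyRange 0 n 1).map (fun v =>
        (PySem.List.pyRange 0 n 1).filter (pvPred t v))
  rw [pv_loopsA t c cs hct n]
  by_cases hn1 : 1 ≤ n
  · have hb : 1 + (((n - 1).toNat : Nat) : Int) = n := by
      rw [Int.toNat_of_nonneg (by omega)]; ring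
    have := pv_outer t n (n - 1).toNat (by rw [hb])
    rw [hb] at this
    rw [this]
    apply List.map_congr_left
    intro v hv
    have hv0 : v < n := by
      have := (PySem.List.mem_pyRange_one).mp hv
      omega
    unfold pvRowAt
    rw [if_pos hv0]
  · rw [PySem.List.pyRange_one_eq_nil (by omega), PySem.List.pyRange_one_eq_nil (by omega)]
    simp
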